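-- pv_equiv track=rewrite | github.com/pypi-data/pypi-mirror-213 | packages/annorest/annorest-0.1.0.tar.gz/annorest-0.1.0/annorest/utils.py | get_unique_label_list
-- ===== SOURCE A (Python) =====
-- def flatten(l):
--     """
--     input: [[1,2,3],[4,5,6]]
--     output: [1,2,3,4,5,6]
--     """
--     return [item for sublist in l for item in sublist]
--
-- def remove_BIO_prefix(label_list, custom_prefix=["B-", "I-", "S-"]):
--     """
--     input: ['B-LOC', 'I-LOC', 'O', 'B-PER', 'I-PER', 'O']
--     output: ['LOC', 'LOC', 'O', 'PER', 'PER', 'O']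
--     """
--     label = []
--     for single_label in label_list:
--         if single_label.startswith(tuple(custom_prefix)):
--             label.append(single_label[2:])
--         else:
--             label.append(single_label)
--     return label
--
-- def get_unique_label_list(data, remove_bio_prefix=True):
--     """
--     input: [{'label': ['B-LOC', 'I-LOC', 'O', 'B-PER', 'I-PER', 'O']}]
--     output: ['LOC', 'PER']
--     """
--     label_list = []
--     for single_doc in data:
--         if(remove_bio_prefix):
--             label_list.append(remove_BIO_prefix(single_doc['label']))
--         else:
--             label_list.append(single_doc['label'])
--     label_list = list(dict.fromkeys((flatten(label_list))))
--     if 'O' in label_list: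
--         label_list.remove('O')
--     return label_list
-- ===== SOURCE B (Python) =====
-- def get_unique_label_list(data, remove_bio_prefix=True):
--     result = []
--     seen = set()
--     for single_doc in data:
--         for label in single_doc['label']:
--             if remove_bio_prefix and label.startswith(("B-", "I-", "S-")):
--                 label = label[2:]
--             if label != 'O' and label not in seen:
--                 seen.add(label)
--                 result.append(label)
--     return result
-- ===== Notes on version B (the rewrite author's own statement) =====
-- stated objective: simpler
-- what changed: Replaces A's three materialized passes (per-doc strip lists, flatten, dict.fromkeys dedup, then remove('O')) with one fused traversal keeping an ordered result list and a seen set, skipping 'O' inline.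
import Mathlib
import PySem

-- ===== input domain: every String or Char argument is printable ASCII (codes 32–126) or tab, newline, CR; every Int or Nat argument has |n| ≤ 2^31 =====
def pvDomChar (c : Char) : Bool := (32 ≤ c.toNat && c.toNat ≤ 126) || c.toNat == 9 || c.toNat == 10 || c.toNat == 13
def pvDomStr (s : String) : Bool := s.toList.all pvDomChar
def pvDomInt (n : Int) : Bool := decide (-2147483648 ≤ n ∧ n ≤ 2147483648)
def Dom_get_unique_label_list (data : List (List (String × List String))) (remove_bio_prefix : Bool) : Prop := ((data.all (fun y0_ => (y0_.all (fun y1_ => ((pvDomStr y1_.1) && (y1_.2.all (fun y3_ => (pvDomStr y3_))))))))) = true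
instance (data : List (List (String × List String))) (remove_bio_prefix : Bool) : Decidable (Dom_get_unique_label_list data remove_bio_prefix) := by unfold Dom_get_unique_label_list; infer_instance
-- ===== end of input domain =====

-- B fuses A's per-doc strip lists, flatten, dict.fromkeys dedup and remove('O')
-- into one traversal with an ordered result list and a seen set (objective: simpler).


-- ===== PORT A =====
-- single_doc['label']: first-match dict lookup; Pre_ guarantees the key is present
def pvLabel (doc : List (String × List String)) : List String :=
  (doc.lookup "label").getD []

-- single_label.startswith(("B-", "I-", "S-")) then single_label[2:]
def pvStrip (s : String) : String :=
  if PySem.Str.startswith s "B-" || PySem.Str.startswith s "I-" || PySem.Str.startswith s "S-" then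
    PySem.Str.slice s (some 2) none
  else s

-- remove_BIO_prefix: the loop appending stripped labels
def remove_BIO_prefix (label_list : List String) : List String :=
  label_list.foldl (fun acc s => acc ++ [pvStrip s]) []

-- flatten: the comprehension
def pvFlatten (l : List (List String)) : List String :=
  l.foldl (fun acc sub => acc ++ sub) []

def get_unique_label_list (data : List (List (String × List String))) (remove_bio_prefix : Bool) : List String :=
  let label_list := data.foldl (fun acc doc =>
    acc ++ [if remove_bio_prefix then remove_BIO_prefix (pvLabel doc) else pvLabel doc]) []
  let label_list := PySem.List.dedup (pvFlatten label_list)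
  if "O" ∈ label_list then (PySem.List.remove? label_list "O").getD label_list
  else label_list

-- ===== PORT B =====
-- one pass: state = (result, seen); strip, skip 'O', append if unseen
def pvStep (st : List String × PySem.Set String) (remove_bio_prefix : Bool) (label : String) :
    List String × PySem.Set String :=
  let l := if remove_bio_prefix &&
      (PySem.Str.startswith label "B-" || PySem.Str.startswith label "I-" || PySem.Str.startswith label "S-") then
      PySem.Str.slice label (some 2) none
    else label
  if l ≠ "O" ∧ ¬ PySem.Set.contains st.2 l then (st.1 ++ [l], PySem.Set.add st.2 l) else st

def get_unique_label_list_alt (data : List (List (String × List String))) (remove_bio_prefix : Bool) : List String :=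
  (data.foldl (fun st doc =>
      (pvLabel doc).foldl (fun st l => pvStep st remove_bio_prefix l) st)
    (([] : List String), PySem.Set.empty)).1

-- ===== PRECONDITION & SPEC =====
-- Pre_ excludes exactly the inputs where A raises KeyError: a doc without a 'label' key.
def Pre_get_unique_label_list (data : List (List (String × List String))) (remove_bio_prefix : Bool) : Prop :=
  (data.all (fun doc => doc.any (fun p => p.1 == "label"))) = true
instance (data : List (List (String × List String))) (remove_bio_prefix : Bool) : Decidable (Pre_get_unique_label_list data remove_bio_prefix) := by unfold Pre_get_unique_label_list; infer_instance
def pvWitness_get_unique_label_list : (List (List (String × List String))) × Bool :=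
  ([[("label", ["B-LOC", "O", "I-LOC"])]], true)

def Spec_get_unique_label_list (data : List (List (String × List String))) (remove_bio_prefix : Bool) (out : List String) : Prop := out = get_unique_label_list_alt data remove_bio_prefix
instance (data : List (List (String × List String))) (remove_bio_prefix : Bool) (out : List String) : Decidable (Spec_get_unique_label_list data remove_bio_prefix out) := by unfold Spec_get_unique_label_list; infer_instance

-- ===== CLAIM (what is proved, stated in full; the proofs are below) =====
def Claim_equal_get_unique_label_list : Prop := ∀ (data : List (List (String × List String))) (remove_bio_prefix : Bool), Dom_get_unique_label_list data remove_bio_prefix → Pre_get_unique_label_list data remove_bio_prefix → Spec_get_unique_label_list data remove_bio_prefix (get_unique_label_list data remove_bio_prefix)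

-- ===== LEMMAS AND PROOFS =====

-- the stripped label of one raw label
def pvStripIf (b : Bool) (s : String) : String := if b then pvStrip s else s

-- B's dedup-with-'O'-skipped step, on the result list alone
def pvSkip (r : List String) (l : String) : List String :=
  if l ≠ "O" ∧ l ∉ r then r ++ [l] else r

lemma remove_BIO_eq_map (ls : List String) : remove_BIO_prefix ls = ls.map pvStrip := by
  simpa [remove_BIO_prefix] using PySem.List.foldl_append_singleton_eq_map pvStrip ls []

lemma pvStep_eq (r : List String) (b : Bool) (l : String) :
    pvStep (r, PySem.Set.ofList r) b l =
      (pvSkip r (pvStripIf b l), PySem.Set.ofList (pvSkip r (pvStripIf b l))) := by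
  simp only [pvStep, pvSkip, pvStripIf, pvStrip]
  by_cases hb : b <;>
    simp [hb, PySem.Set.contains, PySem.Set.add, PySem.Set.mem_ofList] <;>
    split_ifs with h1 h2 <;>
      simp_all [PySem.Set.ofList_append, PySem.Set.add, PySem.Set.mem_ofList]

lemma foldl_step_eq (ls : List String) (b : Bool) (r : List String) :
    ls.foldl (fun st l => pvStep st b l) (r, PySem.Set.ofList r) =
      (ls.foldl (fun r l => pvSkip r (pvStripIf b l)) r,
       PySem.Set.ofList (ls.foldl (fun r l => pvSkip r (pvStripIf b l)) r)) := by
  induction ls generalizing r with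
  | nil => rfl
  | cons l ls ih => simp [List.foldl_cons, pvStep_eq, ih]

-- skipping 'O' while folding = filtering 'O' out of the plain dedup fold
lemma skip_filter (F : List String) (r : List String) :
    F.foldl pvSkip (r.filter (· ≠ "O")) = (F.foldl PySem.Set.add r).filter (· ≠ "O") := by
  induction F generalizing r with
  | nil => rfl
  | cons l F ih =>
    by_cases h : l = "O"
    · subst h
      have h1 : pvSkip (r.filter (· ≠ "O")) "O" = r.filter (· ≠ "O") := by simp [pvSkip]
      have h2 : (PySem.Set.add r "O").filter (· ≠ "O") = r.filter (· ≠ "O") := by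
        simp only [PySem.Set.add, PySem.Set.contains]; split_ifs <;> simp
      simp only [List.foldl_cons]
      rw [h1, ← h2, ih]
    · by_cases hm : l ∈ r
      · have h1 : pvSkip (r.filter (· ≠ "O")) l = r.filter (· ≠ "O") := by
          simp [pvSkip, h, hm]
        have h2 : PySem.Set.add r l = r := by
          simp [PySem.Set.add, PySem.Set.contains, hm]
        simp only [List.foldl_cons]; rw [h1, h2, ih]
      · have h1 : pvSkip (r.filter (· ≠ "O")) l = (r ++ [l]).filter (· ≠ "O") := by
          simp [pvSkip, h, hm]
        have h2 : PySem.Set.add r l = r ++ [l] := by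
          simp [PySem.Set.add, PySem.Set.contains, hm]
        simp only [List.foldl_cons]; rw [h1, h2, ih]

lemma foldl_docs_flatten (b : Bool) (data : List (List (String × List String))) :
    ∀ r : List String,
      data.foldl (fun r doc => ((pvLabel doc).map (pvStripIf b)).foldl pvSkip r) r =
        ((data.map (fun doc => (pvLabel doc).map (pvStripIf b))).flatten).foldl pvSkip r := by
  intro r
  induction data generalizing r with
  | nil => rfl
  | cons doc data ih => simp [List.foldl_append, ih]

lemma flatten_eq (l : List (List String)) : pvFlatten l = l.flatten := by
  simpa [pvFlatten, List.flatMap_def] using PySem.List.foldl_append_eq_flatMap id l []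

lemma labels_fold_eq (data : List (List (String × List String))) (b : Bool) :
    data.foldl (fun acc doc =>
      acc ++ [if b then remove_BIO_prefix (pvLabel doc) else pvLabel doc]) [] =
      data.map (fun doc => (pvLabel doc).map (pvStripIf b)) := by
  rw [PySem.List.foldl_append_singleton_eq_map
      (fun doc => if b then remove_BIO_prefix (pvLabel doc) else pvLabel doc) data []]
  simp only [List.nil_append]
  apply List.map_congr_left
  intro doc _
  cases b
  · simp [show pvStripIf false = fun s => s from rfl]
  · simp [remove_BIO_eq_map, pvStripIf]

-- A's result, characterized: filter 'O' out of the dedup of the stripped flat list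
lemma portA_eq (data : List (List (String × List String))) (b : Bool) :
    get_unique_label_list data b =
      (PySem.List.dedup ((data.map (fun doc => (pvLabel doc).map (pvStripIf b))).flatten)).filter
        (· ≠ "O") := by
  simp only [get_unique_label_list, labels_fold_eq, flatten_eq]
  set dd := PySem.List.dedup ((data.map (fun doc => (pvLabel doc).map (pvStripIf b))).flatten) with hdd
  have hnd : dd.Nodup := by rw [hdd]; exact PySem.List.nodup_dedup _
  by_cases h : "O" ∈ dd
  · rw [if_pos h, PySem.List.remove?_eq_some_erase dd "O" h]
    simpa using hnd.erase_eq_filter "O"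
  · rw [if_neg h]
    rw [List.filter_eq_self.2]
    intro a ha
    simp only [ne_eq, decide_eq_true_eq]
    rintro rfl; exact h ha

-- B's result, characterized the same way
lemma portB_eq (data : List (List (String × List String))) (b : Bool) :
    get_unique_label_list_alt data b =
      (PySem.List.dedup ((data.map (fun doc => (pvLabel doc).map (pvStripIf b))).flatten)).filter
        (· ≠ "O") := by
  unfold get_unique_label_list_alt
  have h0 : (([] : List String), (PySem.Set.empty : PySem.Set String)) =
      (([] : List String), PySem.Set.ofList ([] : List String)) := rfl
  rw [h0]
  have step : ∀ (r : List String),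
      data.foldl (fun st doc => (pvLabel doc).foldl (fun st l => pvStep st b l) st)
        (r, PySem.Set.ofList r) =
      (data.foldl (fun r doc => ((pvLabel doc).map (pvStripIf b)).foldl pvSkip r) r,
       PySem.Set.ofList (data.foldl (fun r doc => ((pvLabel doc).map (pvStripIf b)).foldl pvSkip r) r)) := by
    intro r
    induction data generalizing r with
    | nil => rfl
    | cons doc data ih =>
      simp only [List.foldl_cons]
      rw [foldl_step_eq, ih]
      congr 2 <;> simp [List.foldl_map]
  rw [step]
  -- now a single fold of pvSkip over the flattened stripped list
  have hflat : ∀ (r : List String),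
      data.foldl (fun r doc => ((pvLabel doc).map (pvStripIf b)).foldl pvSkip r) r =
        ((data.map (fun doc => (pvLabel doc).map (pvStripIf b))).flatten).foldl pvSkip r := by
    exact foldl_docs_flatten b data
  simp only [hflat]
  have key := skip_filter ((data.map (fun doc => (pvLabel doc).map (pvStripIf b))).flatten) []
  simp only [List.filter_nil] at key
  rw [key, PySem.List.dedup_eq_ofList, PySem.Set.ofList_eq_foldl]

-- ===== VERDICT (by name: the statement is the Claim_ definition above) =====
theorem get_unique_label_list_spec : Claim_equal_get_unique_label_list := by
  intro data b _ _
  unfold Spec_get_unique_label_list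
  rw [portA_eq, portB_eq]
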